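-- pv_equiv track=rewrite | github.com/TalonT-Org/AutoSkillit | tests/docs/test_doc_counts.py | _extract_tool_decorators
-- ===== SOURCE A (Python) =====
-- def _extract_tool_decorators(text: str) -> list[str]:
--     """Extract full @mcp.tool(...) decorator text, handling multi-line decorators."""
--     decorators: list[str] = []
--     lines = text.splitlines()
--     i = 0
--     while i < len(lines):
--         stripped = lines[i].strip()
--         if stripped.startswith("@mcp.tool"):
--             # Collect the full decorator (may span multiple lines)
--             parts = [stripped]
--             if ")" not in stripped:
--                 i += 1
--                 while i < len(lines):
--                     part = lines[i].strip()
--                     parts.append(part)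
--                     if ")" in part:
--                         break
--                     i += 1
--             decorators.append(" ".join(parts))
--         i += 1
--     return decorators
-- ===== SOURCE B (Python) =====
-- def _extract_tool_decorators(text: str) -> list[str]:
--     """Extract full @mcp.tool(...) decorator text, handling multi-line decorators."""
--     decorators: list[str] = []
--     parts: list[str] = []
--     collecting = False
--     for line in text.splitlines():
--         stripped = line.strip()
--         if collecting:
--             parts.append(stripped)
--             if ")" in stripped:
--                 decorators.append(" ".join(parts))
--                 parts = []
--                 collecting = False
--         elif stripped.startswith("@mcp.tool"):
--             parts = [stripped]
--             if ")" in stripped: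
--                 decorators.append(stripped)
--                 parts = []
--             else:
--                 collecting = True
--     if collecting:
--         decorators.append(" ".join(parts))
--     return decorators
-- ===== Notes on version B (the rewrite author's own statement) =====
-- stated objective: simpler
-- what changed: Replaced A's index-driven while loop with a nested inner scan (and manual i bookkeeping) by a single pass over splitlines() maintaining a (parts, collecting) state, flushing any open decorator at EOF.
import Mathlib
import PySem

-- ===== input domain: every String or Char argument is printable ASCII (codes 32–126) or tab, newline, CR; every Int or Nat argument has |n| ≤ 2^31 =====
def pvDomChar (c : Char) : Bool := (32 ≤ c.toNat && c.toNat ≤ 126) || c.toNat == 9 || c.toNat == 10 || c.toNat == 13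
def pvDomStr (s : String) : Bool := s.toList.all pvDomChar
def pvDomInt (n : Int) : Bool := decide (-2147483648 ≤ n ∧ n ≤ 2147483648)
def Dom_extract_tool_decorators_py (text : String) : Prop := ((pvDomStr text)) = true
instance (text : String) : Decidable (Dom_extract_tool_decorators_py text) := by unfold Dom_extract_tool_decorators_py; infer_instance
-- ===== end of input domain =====

-- B replaces A's index-driven while loop with nested inner scan by a single fold over the
-- lines keeping a (parts, collecting) state; same return value, different decomposition.

-- ===== PORT A =====
-- inner 'while i < len(lines): part = lines[i].strip(); parts.append(part); if ")" in part: break; i += 1'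
-- returns (final parts, lines after the break line)
def collectA (parts : List String) : List String → List String × List String
  | [] => (parts, [])
  | l :: rest =>
    let part := PySem.Str.strip l
    if PySem.Str.isIn ")" part then (parts ++ [part], rest)
    else collectA (parts ++ [part]) rest

theorem collectA_snd_length (lines : List String) : ∀ parts, (collectA parts lines).2.length ≤ lines.length := by
  induction lines with
  | nil => intro parts; simp [collectA]
  | cons l rest ih =>
    intro parts
    simp only [collectA]
    split
    · simp
    · exact Nat.le_trans (ih _) (Nat.le_succ _)

-- A's outer 'while i < len(lines)' loop over the remaining lines
def goA : List String → List String
  | [] => []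
  | l :: rest =>
    let stripped := PySem.Str.strip l
    if PySem.Str.startswith stripped "@mcp.tool" then
      if PySem.Str.isIn ")" stripped then
        PySem.Str.join " " [stripped] :: goA rest
      else
        let r := collectA [stripped] rest
        PySem.Str.join " " r.1 :: goA r.2
    else goA rest
termination_by lines => lines.length
decreasing_by
  all_goals simp
  exact collectA_snd_length rest [PySem.Str.strip l]

def extract_tool_decorators_py (text : String) : List String :=
  goA (PySem.Str.splitlines text)

-- ===== PORT B =====
-- one fold step over a line: state = (decorators, parts, collecting)
def stepB (st : List String × List String × Bool) (line : String) : List String × List String × Bool :=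
  let stripped := PySem.Str.strip line
  match st with
  | (decs, parts, true) =>
    let parts' := parts ++ [stripped]
    if PySem.Str.isIn ")" stripped then (decs ++ [PySem.Str.join " " parts'], [], false)
    else (decs, parts', true)
  | (decs, parts, false) =>
    if PySem.Str.startswith stripped "@mcp.tool" then
      if PySem.Str.isIn ")" stripped then (decs ++ [stripped], [], false)
      else (decs, [stripped], true)
    else (decs, parts, false)

def extract_tool_decorators_py_alt (text : String) : List String :=
  let r := (PySem.Str.splitlines text).foldl stepB ([], [], false)
  if r.2.2 then r.1 ++ [PySem.Str.join " " r.2.1] else r.1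

-- ===== PRECONDITION & SPEC =====
def Spec_extract_tool_decorators_py (text : String) (out : List String) : Prop := out = extract_tool_decorators_py_alt text
instance (text : String) (out : List String) : Decidable (Spec_extract_tool_decorators_py text out) := by unfold Spec_extract_tool_decorators_py; infer_instance

-- ===== CLAIM (what is proved, stated in full; the proofs are below) =====
def Claim_equal_extract_tool_decorators_py : Prop := ∀ (text : String), Dom_extract_tool_decorators_py text → Spec_extract_tool_decorators_py text (extract_tool_decorators_py text)

-- ===== LEMMAS AND PROOFS =====
theorem goA_nil : goA [] = [] := by rw [goA]

theorem goA_cons (l : String) (rest : List String) :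
    goA (l :: rest) =
      (let stripped := PySem.Str.strip l
       if PySem.Str.startswith stripped "@mcp.tool" then
         if PySem.Str.isIn ")" stripped then
           PySem.Str.join " " [stripped] :: goA rest
         else
           let r := collectA [stripped] rest
           PySem.Str.join " " r.1 :: goA r.2
       else goA rest) := by rw [goA]

-- flush of the fold's final state
def flushB (r : List String × List String × Bool) : List String :=
  if r.2.2 then r.1 ++ [PySem.Str.join " " r.2.1] else r.1

theorem join_single (s : String) : PySem.Str.join " " [s] = s := by
  simp [PySem.Str.join, PySem.Chars.join, List.intercalate]

-- core invariant: the fold from either state agrees with A's loop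
theorem fold_both (lines : List String) :
    (∀ decs ps0, flushB (lines.foldl stepB (decs, ps0, false)) = decs ++ goA lines) ∧
    (∀ decs ps, flushB (lines.foldl stepB (decs, ps, true)) =
      decs ++ PySem.Str.join " " (collectA ps lines).1 :: goA (collectA ps lines).2) := by
  induction lines with
  | nil =>
    constructor
    · intro decs ps0; simp [flushB, goA_nil]
    · intro decs ps; simp [flushB, collectA, goA_nil]
  | cons l rest ih =>
    constructor
    · intro decs ps0
      simp only [List.foldl_cons, stepB, goA_cons]
      split
      · split
        · rw [ih.1]; simp [join_single]
        · rw [ih.2]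
      · exact ih.1 decs ps0
    · intro decs ps
      simp only [List.foldl_cons, stepB, collectA]
      split
      · rw [ih.1]; simp
      · rw [ih.2]

-- ===== VERDICT (by name: the statement is the Claim_ definition above) =====
theorem extract_tool_decorators_py_spec : Claim_equal_extract_tool_decorators_py := by
  intro text _
  unfold Spec_extract_tool_decorators_py extract_tool_decorators_py extract_tool_decorators_py_alt
  have h := (fold_both (PySem.Str.splitlines text)).1 [] []
  simp only [flushB] at h
  simpa using h.symm
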